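-- pv_equiv track=rewrite | github.com/akash-spectrasoln/migcockpit-resrructured | api/views/expressions.py | _parse_function_call
-- ===== SOURCE A (Python) =====
-- def _parse_function_call(func_name: str, start_idx: int, tokens: list[str]) -> tuple:
--     """Parse a function call and return (end_index, arguments_list, has_arithmetic_in_args)"""
--     if start_idx + 1 >= len(tokens) or tokens[start_idx + 1] != '(':
--         return (start_idx, [], False)
--
--     # Find matching closing parenthesis
--     paren_count = 0
--     arg_tokens = []
--     i = start_idx + 2  # Skip function name and opening paren
--     has_arithmetic = False
--
--     while i < len(tokens):
--         token = tokens[i]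
--
--         if token == '(':
--             paren_count += 1
--             arg_tokens.append(token)
--         elif token == ')':
--             if paren_count == 0:
--                 # Found closing paren for this function
--                 break
--             paren_count -= 1
--             arg_tokens.append(token)
--         elif token == ',' and paren_count == 0:
--             # Argument separator at top level
--             arg_tokens.append(token)
--         else:
--             arg_tokens.append(token)
--             # Check for arithmetic operators
--             if token in ['+', '-', '*', '/']:
--                 has_arithmetic = True
--
--         i += 1
--
--     # Parse arguments (split by commas at top level)
--     arguments = []
--     current_arg = []
--     paren_level = 0
--
--     for token in arg_tokens:
--         if token == '(':
--             paren_level += 1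
--             current_arg.append(token)
--         elif token == ')':
--             paren_level -= 1
--             current_arg.append(token)
--         elif token == ',' and paren_level == 0:
--             if current_arg:
--                 arguments.append(' '.join(current_arg))
--                 current_arg = []
--         else:
--             current_arg.append(token)
--
--     if current_arg:
--         arguments.append(' '.join(current_arg))
--
--     return (i, arguments, has_arithmetic)
-- ===== SOURCE B (Python) =====
-- def _parse_function_call(func_name: str, start_idx: int, tokens: list[str]) -> tuple:
--     """Single pass: one depth counter, a current-argument buffer, flags set on the fly."""
--     if start_idx + 1 >= len(tokens) or tokens[start_idx + 1] != '(':
--         return (start_idx, [], False)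
--
--     depth = 0
--     buf = []
--     arguments = []
--     has_arithmetic = False
--     i = start_idx + 2
--     n = len(tokens)
--
--     while i < n:
--         t = tokens[i]
--         if t == ')' and depth == 0:
--             break
--         if t == '(':
--             depth += 1
--             buf.append(t)
--         elif t == ')':
--             depth -= 1
--             buf.append(t)
--         elif t == ',' and depth == 0:
--             if buf:
--                 arguments.append(' '.join(buf))
--                 buf = []
--         else:
--             buf.append(t)
--             if t in ('+', '-', '*', '/'):
--                 has_arithmetic = True
--         i += 1
--
--     if buf:
--         arguments.append(' '.join(buf))
--     return (i, arguments, has_arithmetic)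
-- ===== Notes on version B (the rewrite author's own statement) =====
-- stated objective: simpler
-- what changed: Fuses A's two sequential passes (collect arg_tokens into an intermediate list, then re-scan it with a second paren counter to split on top-level commas) into one pass over tokens with a single depth counter and a current-argument buffer, eliminating the intermediate list and the second loop.
-- outside the precondition, e.g. on _parse_function_call('f', -7, ['f', '(', 'a', ')']): A raises IndexError, B raises IndexError
import Mathlib
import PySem

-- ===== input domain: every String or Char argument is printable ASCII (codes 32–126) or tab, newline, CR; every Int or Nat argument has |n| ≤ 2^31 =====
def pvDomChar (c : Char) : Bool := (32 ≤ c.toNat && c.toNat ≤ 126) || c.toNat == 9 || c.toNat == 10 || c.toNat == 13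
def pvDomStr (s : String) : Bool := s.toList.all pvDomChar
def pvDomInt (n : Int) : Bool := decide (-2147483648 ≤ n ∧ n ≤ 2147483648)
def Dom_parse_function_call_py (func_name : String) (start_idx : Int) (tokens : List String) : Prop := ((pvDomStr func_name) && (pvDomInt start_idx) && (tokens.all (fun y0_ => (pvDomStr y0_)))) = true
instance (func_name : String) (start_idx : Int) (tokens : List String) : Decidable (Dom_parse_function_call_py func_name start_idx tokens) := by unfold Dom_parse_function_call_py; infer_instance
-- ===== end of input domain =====

-- B fuses A's two passes (collect arg_tokens, then split on top-level commas) into one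
-- pass with a single depth counter and a current-argument buffer; objective: simpler.

-- ===== PORT A =====
-- first while loop of A: fuel = tokens.length - i; state (i, paren_count, collected arg_tokens, has_arithmetic)
def pvALoop (tokens : List String) : Nat → Int → Int → Bool → Int × List String × Bool
  | 0, i, _, ha => (i, [], ha)
  | fuel + 1, i, pc, ha =>
    let token := (PySem.List.pyGet? tokens i).getD ""   -- in range whenever Pre_ holds
    if token = "(" then
      let r := pvALoop tokens fuel (i + 1) (pc + 1) ha
      (r.1, token :: r.2.1, r.2.2)
    else if token = ")" then
      if pc = 0 then (i, [], ha)
      else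
        let r := pvALoop tokens fuel (i + 1) (pc - 1) ha
        (r.1, token :: r.2.1, r.2.2)
    else if token = "," ∧ pc = 0 then
      let r := pvALoop tokens fuel (i + 1) pc ha
      (r.1, token :: r.2.1, r.2.2)
    else
      let ha' := if token = "+" ∨ token = "-" ∨ token = "*" ∨ token = "/" then true else ha
      let r := pvALoop tokens fuel (i + 1) pc ha'
      (r.1, token :: r.2.1, r.2.2)

-- second for loop of A: split arg_tokens on top-level commas; state (arguments, current_arg, paren_level)
def pvASplit : List String → List String → List String → Int → List String
  | [], args, cur, _ => if cur ≠ [] then args ++ [PySem.Str.join " " cur] else args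
  | t :: ts, args, cur, lvl =>
    if t = "(" then pvASplit ts args (cur ++ [t]) (lvl + 1)
    else if t = ")" then pvASplit ts args (cur ++ [t]) (lvl - 1)
    else if t = "," ∧ lvl = 0 then
      if cur ≠ [] then pvASplit ts (args ++ [PySem.Str.join " " cur]) [] lvl
      else pvASplit ts args cur lvl
    else pvASplit ts args (cur ++ [t]) lvl

def parse_function_call_py (func_name : String) (start_idx : Int) (tokens : List String) : Int × List String × Bool :=
  if tokens.length ≤ start_idx + 1 ∨ (PySem.List.pyGet? tokens (start_idx + 1)).getD "" ≠ "(" then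
    (start_idx, [], false)
  else
    let r := pvALoop tokens (tokens.length - (start_idx + 2)).toNat (start_idx + 2) 0 false
    (r.1, pvASplit r.2.1 [] [] 0, r.2.2)

-- ===== PORT B =====
-- B's single while loop: state (i, depth, buf, arguments, has_arithmetic)
def pvBLoop (tokens : List String) : Nat → Int → Int → List String → List String → Bool → Int × List String × Bool
  | 0, i, _, buf, args, ha =>
    (i, (if buf ≠ [] then args ++ [PySem.Str.join " " buf] else args), ha)
  | fuel + 1, i, depth, buf, args, ha =>
    let t := (PySem.List.pyGet? tokens i).getD ""
    if t = ")" ∧ depth = 0 then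
      (i, (if buf ≠ [] then args ++ [PySem.Str.join " " buf] else args), ha)
    else if t = "(" then pvBLoop tokens fuel (i + 1) (depth + 1) (buf ++ [t]) args ha
    else if t = ")" then pvBLoop tokens fuel (i + 1) (depth - 1) (buf ++ [t]) args ha
    else if t = "," ∧ depth = 0 then
      if buf ≠ [] then pvBLoop tokens fuel (i + 1) depth [] (args ++ [PySem.Str.join " " buf]) ha
      else pvBLoop tokens fuel (i + 1) depth buf args ha
    else
      pvBLoop tokens fuel (i + 1) depth (buf ++ [t]) args
        (if t = "+" ∨ t = "-" ∨ t = "*" ∨ t = "/" then true else ha)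

def parse_function_call_py_alt (func_name : String) (start_idx : Int) (tokens : List String) : Int × List String × Bool :=
  if tokens.length ≤ start_idx + 1 ∨ (PySem.List.pyGet? tokens (start_idx + 1)).getD "" ≠ "(" then
    (start_idx, [], false)
  else
    pvBLoop tokens (tokens.length - (start_idx + 2)).toNat (start_idx + 2) 0 [] [] false

-- ===== PRECONDITION & SPEC =====
-- Pre_ excludes only the inputs where Python raises IndexError (start_idx + 1 < -len(tokens)
-- while start_idx + 1 < len(tokens)); both A and B raise there, no value is returned.
def Pre_parse_function_call_py (func_name : String) (start_idx : Int) (tokens : List String) : Prop :=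
  (tokens.length : Int) ≤ start_idx + 1 ∨ -(tokens.length : Int) ≤ start_idx + 1
instance (func_name : String) (start_idx : Int) (tokens : List String) : Decidable (Pre_parse_function_call_py func_name start_idx tokens) := by unfold Pre_parse_function_call_py; infer_instance

def pvWitness_parse_function_call_py : String × Int × List String := ("f", 0, ["f", "(", "a", "+", "b", ",", "c", ")"])

def Spec_parse_function_call_py (func_name : String) (start_idx : Int) (tokens : List String) (out : Int × List String × Bool) : Prop := out = parse_function_call_py_alt func_name start_idx tokens
instance (func_name : String) (start_idx : Int) (tokens : List String) (out : Int × List String × Bool) : Decidable (Spec_parse_function_call_py func_name start_idx tokens out) := by unfold Spec_parse_function_call_py; infer_instance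

-- ===== CLAIM (what is proved, stated in full; the proofs are below) =====
def Claim_equal_parse_function_call_py : Prop := ∀ (func_name : String) (start_idx : Int) (tokens : List String), Dom_parse_function_call_py func_name start_idx tokens → Pre_parse_function_call_py func_name start_idx tokens → Spec_parse_function_call_py func_name start_idx tokens (parse_function_call_py func_name start_idx tokens)

-- ===== LEMMAS AND PROOFS =====

-- fused-loop invariant: running B's loop with buffer cur, accumulated args and depth pc
-- equals running A's collection loop at paren_count pc and then splitting its output
-- starting from split state (args, cur, pc).
theorem pvLoop_fuse (tokens : List String) :
    ∀ (fuel : Nat) (i pc : Int) (args cur : List String) (ha : Bool),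
      pvBLoop tokens fuel i pc cur args ha =
        ((pvALoop tokens fuel i pc ha).1,
         pvASplit (pvALoop tokens fuel i pc ha).2.1 args cur pc,
         (pvALoop tokens fuel i pc ha).2.2) := by
  intro fuel
  induction fuel with
  | zero => intro i pc args cur ha; simp [pvBLoop, pvALoop, pvASplit]
  | succ n ih =>
    intro i pc args cur ha
    simp only [pvBLoop, pvALoop]
    set t := (PySem.List.pyGet? tokens i).getD "" with ht
    by_cases h1 : t = "("
    · simp [h1, pvASplit, ih]
    · by_cases h2 : t = ")"
      · by_cases h3 : pc = 0
        · simp [h2, h3, pvASplit]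
        · simp [h2, h3, pvASplit, ih]
      · by_cases h4 : t = "," ∧ pc = 0
        · by_cases h5 : cur = []
          · simp [h4, h5, pvASplit, ih]
          · simp [h4, h5, pvASplit, ih]
        · simp [h1, h2, h4, pvASplit, ih]

-- ===== VERDICT (by name: the statement is the Claim_ definition above) =====
theorem parse_function_call_py_spec : Claim_equal_parse_function_call_py := by
  intro func_name start_idx tokens _ _
  unfold Spec_parse_function_call_py parse_function_call_py parse_function_call_py_alt
  split_ifs with h
  · rfl
  · rw [pvLoop_fuse]
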